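-- pv_equiv track=rewrite | github.com/Caravestal/WstepPython | lab06.py | hide_password
-- ===== SOURCE A (Python) =====
-- def hide_password(password):
--     hidden = ''
--     for char in password:
--         if char != ' ':
--             hidden += '_'
--         else:
--             hidden += ' '
--     return hidden
-- ===== SOURCE B (Python) =====
-- def hide_password(password):
--     # Split on literal spaces, mask each chunk by its length, and stitch the
--     # spaces back in with join -- no per-character branching.
--     return ' '.join('_' * len(part) for part in password.split(' '))
-- ===== Notes on version B (the rewrite author's own statement) =====
-- stated objective: faster
-- what changed: Instead of scanning character by character and growing a string with repeated concatenation, B splits the string on spaces, replaces each space-free chunk wholesale by a run of underscores of its length, and rejoins the chunks with spaces.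
import Mathlib
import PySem

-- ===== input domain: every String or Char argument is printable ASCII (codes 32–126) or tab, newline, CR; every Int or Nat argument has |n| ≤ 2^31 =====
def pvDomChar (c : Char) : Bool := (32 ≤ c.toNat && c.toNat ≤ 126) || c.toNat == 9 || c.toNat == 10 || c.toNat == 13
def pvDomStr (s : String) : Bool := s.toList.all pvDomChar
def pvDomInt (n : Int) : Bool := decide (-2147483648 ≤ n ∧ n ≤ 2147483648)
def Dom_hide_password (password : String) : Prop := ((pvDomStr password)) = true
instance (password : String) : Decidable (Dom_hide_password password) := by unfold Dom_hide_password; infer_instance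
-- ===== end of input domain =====

-- B replaces A's per-character accumulator loop by a split-on-space / mask-each-chunk-by-length / join pipeline; the return values are proved equal.

-- ===== PORT A =====
-- A: fold over the characters, appending '_' or ' ' to the accumulator string.
def hide_password (password : String) : String :=
  password.toList.foldl (fun hidden char =>
    if char ≠ ' ' then hidden ++ "_" else hidden ++ " ") ""

-- ===== PORT B =====
-- B: ' '.join('_' * len(part) for part in password.split(' ')).
def hide_password_alt (password : String) : String :=
  String.ofList (PySem.Chars.join [' ']
    ((PySem.Chars.splitOn password.toList [' ']).map
      (fun part => List.replicate part.length '_')))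

-- ===== PRECONDITION & SPEC =====
def Spec_hide_password (password : String) (out : String) : Prop := out = hide_password_alt password
instance (password : String) (out : String) : Decidable (Spec_hide_password password out) := by unfold Spec_hide_password; infer_instance

-- ===== CLAIM (what is proved, stated in full; the proofs are below) =====
def Claim_equal_hide_password : Prop := ∀ (password : String), Dom_hide_password password → Spec_hide_password password (hide_password password)

-- ===== LEMMAS AND PROOFS =====
-- A's fold, characterised as a per-character map.
lemma hide_fold_eq (l : List Char) (acc : String) :
    (l.foldl (fun hidden char => if char ≠ ' ' then hidden ++ "_" else hidden ++ " ") acc).toList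
      = acc.toList ++ l.map (fun c => if c = ' ' then ' ' else '_') := by
  induction l generalizing acc with
  | nil => simp
  | cons c t ih =>
    simp only [List.foldl, List.map]
    rw [ih]
    by_cases h : c = ' ' <;> simp [h]

-- appending one chunk to an intercalation
lemma intercalate_snoc (s : List Char) (X : List (List Char)) (y : List Char) :
    List.intercalate s (X ++ [y]) = List.intercalate s X ++ (if X = [] then [] else s) ++ y := by
  induction X with
  | nil => simp [List.intercalate]
  | cons x X' ih =>
    cases X' <;> simp_all [List.intercalate]

-- loop invariant of the fuel-based splitter, composed with the mask and the join
lemma go_inv (fuel : Nat) (l cur : List Char) (acc : List (List Char))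
    (h : l.length < fuel) :
    List.intercalate [' ']
        ((PySem.Chars.splitOn.go [' '] fuel l cur acc).map
          (fun part => List.replicate part.length '_'))
      = List.intercalate [' ']
          (((cur.reverse :: acc).reverse).map
            (fun part => List.replicate part.length '_'))
        ++ l.map (fun c => if c = ' ' then ' ' else '_') := by
  induction l generalizing fuel cur acc with
  | nil =>
    cases fuel with
    | zero => omega
    | succ n => simp [PySem.Chars.splitOn.go]
  | cons c rest ih =>
    cases fuel with
    | zero => omega
    | succ n =>
      by_cases hc : c = ' '
      · subst hc
        rw [show PySem.Chars.splitOn.go [' '] (n+1) (' '::rest) cur acc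
              = PySem.Chars.splitOn.go [' '] n rest [] (cur.reverse::acc) by
            simp [PySem.Chars.splitOn.go, List.isPrefixOf]]
        rw [ih n [] (cur.reverse::acc) (by simpa using Nat.lt_of_succ_lt_succ h)]
        simp only [List.reverse_cons, List.map_append, List.map,
          List.reverse_nil, List.length_nil, List.replicate]
        rw [intercalate_snoc]
        simp
      · rw [show PySem.Chars.splitOn.go [' '] (n+1) (c::rest) cur acc
              = PySem.Chars.splitOn.go [' '] n rest (c::cur) acc by
            simp [PySem.Chars.splitOn.go, List.isPrefixOf, Ne.symm hc]]
        rw [ih n (c::cur) acc (by simpa using Nat.lt_of_succ_lt_succ h)]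
        simp only [List.reverse_cons, List.map_append, List.map, hc]
        rw [intercalate_snoc, intercalate_snoc]
        simp [List.replicate_succ']

-- ===== VERDICT (by name: the statement is the Claim_ definition above) =====
theorem hide_password_spec : Claim_equal_hide_password := by
  intro password _
  show hide_password password = hide_password_alt password
  unfold hide_password hide_password_alt
  apply String.toList_inj.mp
  rw [hide_fold_eq]
  simp only [PySem.Chars.splitOn, PySem.Chars.join]
  rw [go_inv password.toList.length.succ password.toList [] [] (Nat.lt_succ_self _)]
  simp [List.intercalate, String.toList_ofList]
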